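-- pv_equiv track=rewrite | github.com/pypi-data/pypi-mirror-347 | packages/isotools/isotools-2.0.0.tar.gz/isotools-2.0.0/src/isotools/_utils.py | count_distinct_exon_chain
-- ===== SOURCE A (Python) =====
-- def count_distinct_exon_chain(ec_list, strict_ec=0, strict_pos=15):
--     """
--     :param ec_list: A list of exon chains, sorted by their abundance descendingly (output from structure_feature_cov).
--     :param strict_ec: Distance allowed between each position, except for the first/last, in two exon chains so that they can be considered as identical.
--     :param strict_pos: Difference allowed between two positions when considering identical TSS/PAS.
--     :return: How many distinct exon chains are there.
--     """
--
--     merged_idx = set()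
--     for x in range(len(ec_list) - 1):
--         if x in merged_idx:
--             continue
--         for y in range(x + 1, len(ec_list)):
--             if y in merged_idx:
--                 continue
--             # if the number of exons is different, skip
--             if len(ec_list[x]) != len(ec_list[y]):
--                 continue
--
--             pos_in_x = [pos for exon in ec_list[x] for pos in exon]
--             pos_in_y = [pos for exon in ec_list[y] for pos in exon]
--
--             pos_diff = [abs(m - n) for m, n in zip(pos_in_x, pos_in_y)]
--
--             if all(
--                 (
--                     d <= strict_pos
--                     if (i == 0 or i == len(pos_diff) - 1)
--                     else d <= strict_ec
--                 )
--                 for i, d in enumerate(pos_diff)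
--             ):
--                 # keep the one with higher coverage
--                 merged_idx.add(y)
--
--     return len(ec_list) - len(merged_idx)
-- ===== SOURCE B (Python) =====
-- def count_distinct_exon_chain(ec_list, strict_ec=0, strict_pos=15):
--     """Single forward pass: keep a list of representative (flattened) exon
--     chains; each chain is counted distinct unless it matches an earlier
--     representative."""
--     reps = []
--     for chain in ec_list:
--         flat = [pos for exon in chain for pos in exon]
--         if not any(_matches(r, flat, strict_ec, strict_pos) for r in reps):
--             reps.append(flat)
--     return len(reps)
--
--
-- def _matches(r, f, strict_ec, strict_pos):
--     if len(r) != len(f):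
--         return False
--     diff = [abs(m - n) for m, n in zip(r, f)]
--     return all(
--         (d <= strict_pos if (i == 0 or i == len(diff) - 1) else d <= strict_ec)
--         for i, d in enumerate(diff)
--     )
-- ===== Notes on version B (the rewrite author's own statement) =====
-- stated objective: simpler
-- what changed: Replaces A's index-based double loop over range(len) with a merged-index set by a single forward pass that keeps a list of representative flattened chains and counts a chain as distinct unless it matches an earlier representative.
import Mathlib
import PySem

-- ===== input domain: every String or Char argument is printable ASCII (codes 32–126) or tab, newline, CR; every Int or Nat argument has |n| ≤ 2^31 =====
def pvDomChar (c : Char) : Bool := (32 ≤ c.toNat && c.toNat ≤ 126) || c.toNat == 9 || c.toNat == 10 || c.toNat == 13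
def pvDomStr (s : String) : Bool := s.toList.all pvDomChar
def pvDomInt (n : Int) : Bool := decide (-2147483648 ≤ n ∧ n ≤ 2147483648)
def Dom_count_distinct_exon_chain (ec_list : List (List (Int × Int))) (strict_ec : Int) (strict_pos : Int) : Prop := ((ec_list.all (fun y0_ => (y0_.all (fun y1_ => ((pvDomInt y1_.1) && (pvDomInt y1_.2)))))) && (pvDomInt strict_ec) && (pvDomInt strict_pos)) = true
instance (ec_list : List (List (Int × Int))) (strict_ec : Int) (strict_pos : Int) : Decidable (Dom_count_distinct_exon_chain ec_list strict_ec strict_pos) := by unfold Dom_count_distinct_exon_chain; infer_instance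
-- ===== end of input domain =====

-- B replaces A's index-based O(n²) double loop with a merged-index set by a single
-- forward pass that keeps a list of representative flattened chains (objective:
-- simpler decomposition, same asymptotic cost).

-- ===== PORT A =====
-- literal port of A: outer loop over x in range(len-1), inner over y in range(x+1, len),
-- merged_idx as a Python set of indices.
def count_distinct_exon_chain (ec_list : List (List (Int × Int))) (strict_ec : Int) (strict_pos : Int) : Int :=
  let merged_idx : PySem.Set Int :=
    (PySem.List.pyRange 0 ((ec_list.length : Int) - 1) 1).foldl (fun merged_idx x =>
      if PySem.Set.contains merged_idx x then merged_idx else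
      (PySem.List.pyRange (x + 1) (ec_list.length : Int) 1).foldl (fun merged_idx y =>
        if PySem.Set.contains merged_idx y then merged_idx else
        if (PySem.List.pyGetD ec_list x []).length ≠ (PySem.List.pyGetD ec_list y []).length then merged_idx else
        let pos_in_x := (PySem.List.pyGetD ec_list x []).flatMap (fun exon => [exon.1, exon.2])
        let pos_in_y := (PySem.List.pyGetD ec_list y []).flatMap (fun exon => [exon.1, exon.2])
        let pos_diff := (pos_in_x.zip pos_in_y).map (fun p => |p.1 - p.2|)
        if (PySem.List.enumerate pos_diff 0).all (fun id =>
              if id.1 = 0 ∨ id.1 = (pos_diff.length : Int) - 1 then id.2 ≤ strict_pos else id.2 ≤ strict_ec)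
        then PySem.Set.add merged_idx y else merged_idx) merged_idx) PySem.Set.empty
  (ec_list.length : Int) - PySem.Set.len merged_idx

-- ===== PORT B =====
-- B-side helper: the fuzzy comparison of two flattened chains (_matches in Source B)
def pvMatches (r f : List Int) (strict_ec : Int) (strict_pos : Int) : Bool :=
  if r.length ≠ f.length then false else
  let diff := (r.zip f).map (fun p => |p.1 - p.2|)
  (PySem.List.enumerate diff 0).all (fun id =>
    if id.1 = 0 ∨ id.1 = (diff.length : Int) - 1 then id.2 ≤ strict_pos else id.2 ≤ strict_ec)

def count_distinct_exon_chain_alt (ec_list : List (List (Int × Int))) (strict_ec : Int) (strict_pos : Int) : Int :=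
  let reps : List (List Int) := ec_list.foldl (fun reps chain =>
    let flat := chain.flatMap (fun exon => [exon.1, exon.2])
    if reps.any (fun r => pvMatches r flat strict_ec strict_pos) then reps
    else reps ++ [flat]) []
  (reps.length : Int)

-- ===== PRECONDITION & SPEC =====
def Spec_count_distinct_exon_chain (ec_list : List (List (Int × Int))) (strict_ec : Int) (strict_pos : Int) (out : Int) : Prop := out = count_distinct_exon_chain_alt ec_list strict_ec strict_pos
instance (ec_list : List (List (Int × Int))) (strict_ec : Int) (strict_pos : Int) (out : Int) : Decidable (Spec_count_distinct_exon_chain ec_list strict_ec strict_pos out) := by unfold Spec_count_distinct_exon_chain; infer_instance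

-- ===== CLAIM (what is proved, stated in full; the proofs are below) =====
def Claim_equal_count_distinct_exon_chain : Prop := ∀ (ec_list : List (List (Int × Int))) (strict_ec : Int) (strict_pos : Int), Dom_count_distinct_exon_chain ec_list strict_ec strict_pos → Spec_count_distinct_exon_chain ec_list strict_ec strict_pos (count_distinct_exon_chain ec_list strict_ec strict_pos)

-- ===== LEMMAS AND PROOFS =====

-- flattened chain at index k
def pvFl (L : List (List (Int × Int))) (k : Nat) : List Int :=
  (L.getD k []).flatMap (fun exon => [exon.1, exon.2])

-- the tolerance test between the chains at indices r and y
def pvMge (L : List (List (Int × Int))) (se sp : Int) (r y : Nat) : Bool :=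
  pvMatches (pvFl L r) (pvFl L y) se sp

-- representative indices among the first k chains
def pvReps (L : List (List (Int × Int))) (se sp : Int) : Nat → List Nat
  | 0 => []
  | k+1 =>
    let R := pvReps L se sp k
    if R.any (fun r => pvMge L se sp r k) then R else R ++ [k]

-- index y is absorbed by an earlier representative
def pvMrg (L : List (List (Int × Int))) (se sp : Int) (y : Nat) : Bool :=
  (pvReps L se sp y).any (fun r => pvMge L se sp r y)

theorem pvReps_lt (L : List (List (Int × Int))) (se sp : Int) (k : Nat) :
    ∀ r ∈ pvReps L se sp k, r < k := by
  induction k with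
  | zero => simp [pvReps]
  | succ k ih =>
      intro r hr
      simp only [pvReps] at hr
      split at hr
      · exact Nat.lt_succ_of_lt (ih r hr)
      · rcases List.mem_append.1 hr with h | h
        · exact Nat.lt_succ_of_lt (ih r h)
        · simp at h; omega

theorem pvReps_mono (L : List (List (Int × Int))) (se sp : Int) {k m : Nat} (h : k ≤ m) :
    ∀ r ∈ pvReps L se sp k, r ∈ pvReps L se sp m := by
  induction m with
  | zero =>
      intro r hr
      have : k = 0 := Nat.le_zero.1 h
      subst this; exact hr
  | succ m ih =>
      intro r hr
      rcases Nat.lt_or_ge k (m+1) with hk | hk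
      · have : r ∈ pvReps L se sp m := by
          rcases Nat.eq_or_lt_of_le (Nat.le_of_lt_succ hk) with rfl | hlt
          · exact hr
          · exact ih (by omega) r hr
        simp only [pvReps]
        split
        · exact this
        · exact List.mem_append.2 (Or.inl this)
      · have : k = m + 1 := by omega
        subst this; exact hr

theorem pvReps_self (L : List (List (Int × Int))) (se sp : Int) {m r : Nat}
    (h : r ∈ pvReps L se sp m) : r ∈ pvReps L se sp (r+1) := by
  induction m with
  | zero => simp [pvReps] at h
  | succ m ih =>
      simp only [pvReps] at h
      split at h
      · exact ih h
      · rcases List.mem_append.1 h with h | h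
        · exact ih h
        · simp at h; subst h
          simp only [pvReps]
          split
          · simp_all
          · exact List.mem_append.2 (Or.inr (by simp))

theorem pvMem_reps_iff (L : List (List (Int × Int))) (se sp : Int) (m y : Nat) :
    y ∈ pvReps L se sp m ↔ y < m ∧ pvMrg L se sp y = false := by
  constructor
  · intro h
    refine ⟨pvReps_lt L se sp m y h, ?_⟩
    have h1 := pvReps_self L se sp h
    simp only [pvReps] at h1
    by_cases hc : ((pvReps L se sp y).any fun r => pvMge L se sp r y) = true
    · rw [if_pos hc] at h1
      exact absurd (pvReps_lt L se sp y y h1) (by omega)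
    · exact Bool.not_eq_true _ ▸ (by simpa [pvMrg] using hc)
  · rintro ⟨hy, hm⟩
    have : y ∈ pvReps L se sp (y+1) := by
      simp only [pvReps]
      rw [if_neg (by simpa [pvMrg] using hm)]
      exact List.mem_append.2 (Or.inr (by simp))
    exact pvReps_mono L se sp (by omega) y this

theorem pvReps_nodup (L : List (List (Int × Int))) (se sp : Int) (k : Nat) :
    (pvReps L se sp k).Nodup := by
  induction k with
  | zero => simp [pvReps]
  | succ k ih =>
      simp only [pvReps]
      split
      · exact ih
      · refine List.nodup_append.2 ⟨ih, List.nodup_singleton _, ?_⟩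
        intro a ha; have := pvReps_lt L se sp k a ha; simp; omega

-- the absorption condition, stated with an arbitrary large enough reps stage
theorem pvMrg_iff (L : List (List (Int × Int))) (se sp : Int) {m y : Nat} (h : y ≤ m) :
    pvMrg L se sp y = true ↔ ∃ r ∈ pvReps L se sp m, r < y ∧ pvMge L se sp r y = true := by
  constructor
  · intro hm
    rcases List.any_eq_true.1 (by simpa [pvMrg] using hm) with ⟨r, hr, hge⟩
    exact ⟨r, pvReps_mono L se sp h r hr, pvReps_lt L se sp y r hr, hge⟩
  · rintro ⟨r, hr, hlt, hge⟩
    have : r ∈ pvReps L se sp y :=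
      pvReps_mono L se sp (by omega) r (pvReps_self L se sp hr)
    exact List.any_eq_true.2 ⟨r, this, hge⟩

theorem pvFlat_length (c : List (Int × Int)) :
    (c.flatMap (fun exon => [exon.1, exon.2])).length = 2 * c.length := by
  induction c with
  | nil => simp
  | cons a t ih => simp [ih]; omega

-- B's fold over the first k chains produces exactly the representative flats
theorem pvAlt_fold (L : List (List (Int × Int))) (se sp : Int) (k : Nat) (hk : k ≤ L.length) :
    (L.take k).foldl (fun reps chain =>
      let flat := chain.flatMap (fun exon => [exon.1, exon.2])
      if reps.any (fun r => pvMatches r flat se sp) then reps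
      else reps ++ [flat]) [] = (pvReps L se sp k).map (pvFl L) := by
  induction k with
  | zero => simp [pvReps]
  | succ k ih =>
      have hk' : k < L.length := by omega
      have ht : L.take (k+1) = L.take k ++ [L[k]] := by
        rw [List.take_add_one, List.getElem?_eq_getElem hk']; rfl
      rw [ht, List.foldl_append, ih (by omega)]
      simp only [List.foldl_cons, List.foldl_nil]
      have hfl : L[k].flatMap (fun exon => [exon.1, exon.2]) = pvFl L k := by
        simp [pvFl, List.getD_eq_getElem?_getD, List.getElem?_eq_getElem hk']
      have hany : (((pvReps L se sp k).map (pvFl L)).any fun r =>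
          pvMatches r (L[k].flatMap (fun exon => [exon.1, exon.2])) se sp)
          = ((pvReps L se sp k).any fun r => pvMge L se sp r k) := by
        rw [List.any_map]
        simp only [Function.comp_def, pvMge, hfl]
      simp only [hany, pvReps]
      split
      · rfl
      · simp [hfl]

-- A's branch structure collapses to a single test on the flattened chains
theorem pvBody_eq (cx cy : List (Int × Int)) (se sp : Int) (s : PySem.Set Int) (y : Int) :
    (if cx.length ≠ cy.length then s else
      let pos_in_x := cx.flatMap (fun exon => [exon.1, exon.2])
      let pos_in_y := cy.flatMap (fun exon => [exon.1, exon.2])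
      let pos_diff := (pos_in_x.zip pos_in_y).map (fun p => |p.1 - p.2|)
      if (PySem.List.enumerate pos_diff 0).all (fun id =>
            if id.1 = 0 ∨ id.1 = (pos_diff.length : Int) - 1 then id.2 ≤ sp else id.2 ≤ se)
      then PySem.Set.add s y else s)
    = (if pvMatches (cx.flatMap (fun exon => [exon.1, exon.2]))
          (cy.flatMap (fun exon => [exon.1, exon.2])) se sp then PySem.Set.add s y else s) := by
  by_cases hlen : cx.length = cy.length
  · have hfl : (cx.flatMap (fun exon => [exon.1, exon.2])).length
        = (cy.flatMap (fun exon => [exon.1, exon.2])).length := by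
      rw [pvFlat_length, pvFlat_length, hlen]
    simp only [pvMatches, if_neg (by omega : ¬ cx.length ≠ cy.length),
      if_neg (by omega : ¬ (cx.flatMap (fun exon => [exon.1, exon.2])).length
        ≠ (cy.flatMap (fun exon => [exon.1, exon.2])).length)]
  · have hfl : (cx.flatMap (fun exon => [exon.1, exon.2])).length
        ≠ (cy.flatMap (fun exon => [exon.1, exon.2])).length := by
      rw [pvFlat_length, pvFlat_length]; omega
    simp [pvMatches, hlen]

-- the comparison A makes between the chains at Int indices x and z, as one Bool
def pvCond (L : List (List (Int × Int))) (se sp : Int) (x z : Int) : Bool :=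
  pvMatches ((PySem.List.pyGetD L x []).flatMap (fun exon => [exon.1, exon.2]))
            ((PySem.List.pyGetD L z []).flatMap (fun exon => [exon.1, exon.2])) se sp

-- A's inner-loop body in collapsed form
def pvG (L : List (List (Int × Int))) (se sp x : Int) : PySem.Set Int → Int → PySem.Set Int :=
  fun s y => if PySem.Set.contains s y then s
    else if pvCond L se sp x y then PySem.Set.add s y else s

theorem pvFull_eq (L : List (List (Int × Int))) (se sp x : Int) (s : PySem.Set Int) (y : Int) :
    (if PySem.Set.contains s y then s else
      if (PySem.List.pyGetD L x []).length ≠ (PySem.List.pyGetD L y []).length then s else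
      let pos_in_x := (PySem.List.pyGetD L x []).flatMap (fun exon => [exon.1, exon.2])
      let pos_in_y := (PySem.List.pyGetD L y []).flatMap (fun exon => [exon.1, exon.2])
      let pos_diff := (pos_in_x.zip pos_in_y).map (fun p => |p.1 - p.2|)
      if (PySem.List.enumerate pos_diff 0).all (fun id =>
            if id.1 = 0 ∨ id.1 = (pos_diff.length : Int) - 1 then id.2 ≤ sp else id.2 ≤ se)
      then PySem.Set.add s y else s)
    = pvG L se sp x s y := by
  by_cases hc : PySem.Set.contains s y = true
  · simp only [pvG, if_pos hc]
  · simp only [pvG, if_neg hc]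
    exact pvBody_eq (PySem.List.pyGetD L x []) (PySem.List.pyGetD L y []) se sp s y

theorem pvG_mem (L : List (List (Int × Int))) (se sp x : Int) (s : PySem.Set Int) (y z : Int) :
    z ∈ pvG L se sp x s y ↔ z ∈ s ∨ (z = y ∧ pvCond L se sp x y = true) := by
  simp only [pvG]
  by_cases hc : PySem.Set.contains s y = true
  · rw [if_pos hc]
    constructor
    · exact Or.inl
    · rintro (h | ⟨rfl, _⟩)
      · exact h
      · exact (PySem.Set.contains_iff s z).1 hc
  · rw [if_neg hc]
    by_cases hm : pvCond L se sp x y = true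
    · rw [if_pos hm, PySem.Set.mem_add]
      constructor
      · rintro (h | rfl)
        · exact Or.inl h
        · exact Or.inr ⟨rfl, hm⟩
      · rintro (h | ⟨rfl, _⟩)
        · exact Or.inl h
        · exact Or.inr rfl
    · rw [if_neg hm]
      constructor
      · exact Or.inl
      · rintro (h | ⟨rfl, hm'⟩)
        · exact h
        · exact absurd hm' hm

theorem pvG_nodup (L : List (List (Int × Int))) (se sp x : Int) (s : PySem.Set Int) (y : Int)
    (hs : List.Nodup s) : List.Nodup (pvG L se sp x s y) := by
  simp only [pvG]
  split
  · exact hs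
  · split
    · exact PySem.Set.nodup_add s y hs
    · exact hs

-- A's inner loop: nodup preserved, membership = old ∨ (index in range ∧ matched)
theorem pvG_fold (L : List (List (Int × Int))) (se sp x : Int) (ys : List Int)
    (s : PySem.Set Int) (hs : List.Nodup s) :
    List.Nodup (ys.foldl (pvG L se sp x) s) ∧
    ∀ z, z ∈ ys.foldl (pvG L se sp x) s ↔ z ∈ s ∨ (z ∈ ys ∧ pvCond L se sp x z = true) := by
  induction ys generalizing s with
  | nil => simpa using hs
  | cons y t ih =>
      rcases ih (pvG L se sp x s y) (pvG_nodup L se sp x s y hs) with ⟨h1, h2⟩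
      refine ⟨h1, fun z => ?_⟩
      rw [List.foldl_cons] at *
      rw [h2 z, pvG_mem]
      simp only [List.mem_cons]
      constructor
      · rintro ((h | ⟨rfl, hc⟩) | ⟨ht, hc⟩)
        · exact Or.inl h
        · exact Or.inr ⟨Or.inl rfl, hc⟩
        · exact Or.inr ⟨Or.inr ht, hc⟩
      · rintro (h | ⟨(rfl | ht), hc⟩)
        · exact Or.inl (Or.inl h)
        · exact Or.inl (Or.inr ⟨rfl, hc⟩)
        · exact Or.inr ⟨ht, hc⟩

theorem pvReps_succ (L : List (List (Int × Int))) (se sp : Int) (k : Nat) :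
    pvReps L se sp (k+1)
      = if pvMrg L se sp k then pvReps L se sp k else pvReps L se sp k ++ [k] := rfl

-- the outer loop invariant: after processing x outer indices the merged set holds
-- exactly the indices absorbed by a representative among the first x chains
theorem pvOuter (L : List (List (Int × Int))) (se sp : Int) (x : Nat) (hx : x ≤ L.length) :
    List.Nodup ((PySem.List.pyRange 0 (x : Int) 1).foldl (fun merged_idx x =>
      if PySem.Set.contains merged_idx x then merged_idx else
      (PySem.List.pyRange (x + 1) (L.length : Int) 1).foldl (fun merged_idx y =>
        if PySem.Set.contains merged_idx y then merged_idx else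
        if (PySem.List.pyGetD L x []).length ≠ (PySem.List.pyGetD L y []).length then merged_idx else
        let pos_in_x := (PySem.List.pyGetD L x []).flatMap (fun exon => [exon.1, exon.2])
        let pos_in_y := (PySem.List.pyGetD L y []).flatMap (fun exon => [exon.1, exon.2])
        let pos_diff := (pos_in_x.zip pos_in_y).map (fun p => |p.1 - p.2|)
        if (PySem.List.enumerate pos_diff 0).all (fun id =>
              if id.1 = 0 ∨ id.1 = (pos_diff.length : Int) - 1 then id.2 ≤ sp else id.2 ≤ se)
        then PySem.Set.add merged_idx y else merged_idx) merged_idx) PySem.Set.empty) ∧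
    ∀ z, z ∈ ((PySem.List.pyRange 0 (x : Int) 1).foldl (fun merged_idx x =>
      if PySem.Set.contains merged_idx x then merged_idx else
      (PySem.List.pyRange (x + 1) (L.length : Int) 1).foldl (fun merged_idx y =>
        if PySem.Set.contains merged_idx y then merged_idx else
        if (PySem.List.pyGetD L x []).length ≠ (PySem.List.pyGetD L y []).length then merged_idx else
        let pos_in_x := (PySem.List.pyGetD L x []).flatMap (fun exon => [exon.1, exon.2])
        let pos_in_y := (PySem.List.pyGetD L y []).flatMap (fun exon => [exon.1, exon.2])
        let pos_diff := (pos_in_x.zip pos_in_y).map (fun p => |p.1 - p.2|)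
        if (PySem.List.enumerate pos_diff 0).all (fun id =>
              if id.1 = 0 ∨ id.1 = (pos_diff.length : Int) - 1 then id.2 ≤ sp else id.2 ≤ se)
        then PySem.Set.add merged_idx y else merged_idx) merged_idx) PySem.Set.empty) ↔
      ∃ y : Nat, y < L.length ∧ z = (y : Int) ∧
        ∃ r ∈ pvReps L se sp x, r < y ∧ pvMge L se sp r y = true := by
  induction x with
  | zero =>
      rw [Nat.cast_zero, PySem.List.pyRange_one_eq_nil (le_refl 0)]
      constructor
      · simp [PySem.Set.empty]
      · intro z; simp [PySem.Set.empty, pvReps]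
  | succ x ih =>
      obtain ⟨hnd, hmem⟩ := ih (by omega)
      have hxlt : x < L.length := by omega
      have hcast : ((x + 1 : Nat) : Int) = (x : Int) + 1 := by push_cast; ring
      rw [hcast, PySem.List.pyRange_one_succ_right (by positivity), List.foldl_append,
        List.foldl_cons, List.foldl_nil]
      have hcontain : ∀ s : PySem.Set Int,
          (∀ z, z ∈ s ↔ ∃ y : Nat, y < L.length ∧ z = (y : Int) ∧
            ∃ r ∈ pvReps L se sp x, r < y ∧ pvMge L se sp r y = true) →
          (PySem.Set.contains s (x : Int) = true ↔ pvMrg L se sp x = true) := by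
        intro s hmem'
        rw [PySem.Set.contains_iff, hmem']
        constructor
        · rintro ⟨y, hy, hzy, r, hr, hlt, hge⟩
          have hyx : y = x := by exact_mod_cast hzy.symm
          subst hyx
          exact (pvMrg_iff L se sp (le_refl y)).2 ⟨r, hr, hlt, hge⟩
        · intro h
          rcases (pvMrg_iff L se sp (le_refl x)).1 h with ⟨r, hr, hlt, hge⟩
          exact ⟨x, hxlt, rfl, r, hr, hlt, hge⟩
      by_cases hmrg : pvMrg L se sp x = true
      · rw [if_pos ((hcontain _ hmem).2 hmrg)]
        refine ⟨hnd, fun z => ?_⟩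
        rw [hmem z, pvReps_succ, if_pos hmrg]
      · rw [if_neg (fun h => hmrg ((hcontain _ hmem).1 h))]
        rw [show (fun (merged_idx : PySem.Set Int) (y : Int) =>
            if PySem.Set.contains merged_idx y then merged_idx else
            if (PySem.List.pyGetD L (x : Int) []).length ≠ (PySem.List.pyGetD L y []).length then merged_idx else
            let pos_in_x := (PySem.List.pyGetD L (x : Int) []).flatMap (fun exon => [exon.1, exon.2])
            let pos_in_y := (PySem.List.pyGetD L y []).flatMap (fun exon => [exon.1, exon.2])
            let pos_diff := (pos_in_x.zip pos_in_y).map (fun p => |p.1 - p.2|)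
            if (PySem.List.enumerate pos_diff 0).all (fun id =>
                  if id.1 = 0 ∨ id.1 = (pos_diff.length : Int) - 1 then id.2 ≤ sp else id.2 ≤ se)
            then PySem.Set.add merged_idx y else merged_idx)
            = pvG L se sp (x : Int) from funext fun s' => funext fun y => pvFull_eq L se sp (x : Int) s' y]
        obtain ⟨h1, h2⟩ := pvG_fold L se sp (x : Int)
          (PySem.List.pyRange ((x : Int) + 1) (L.length : Int) 1) _ hnd
        refine ⟨h1, fun z => ?_⟩
        rw [h2 z, hmem z, pvReps_succ, if_neg hmrg]
        constructor
        · rintro (⟨y, hy, rfl, r, hr, hlt, hge⟩ | ⟨hzys, hcond⟩)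
          · exact ⟨y, hy, rfl, r, List.mem_append.2 (Or.inl hr), hlt, hge⟩
          · rcases PySem.List.mem_pyRange_one.1 hzys with ⟨hlb, hub⟩
            have hz0 : 0 ≤ z := by have : (0:Int) ≤ (x:Int) := by positivity
                                   omega
            have hzy : z = (z.toNat : Int) := (Int.toNat_of_nonneg hz0).symm
            refine ⟨z.toNat, by omega, hzy, x, List.mem_append.2 (Or.inr (by simp)), by omega, ?_⟩
            unfold pvCond at hcond
            rw [hzy] at hcond
            rw [PySem.List.pyGetD_natCast, PySem.List.pyGetD_natCast] at hcond
            simpa [pvMge, pvFl] using hcond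
        · rintro ⟨y, hy, rfl, r, hr, hlt, hge⟩
          rcases List.mem_append.1 hr with hr | hr
          · exact Or.inl ⟨y, hy, rfl, r, hr, hlt, hge⟩
          · have hrx : r = x := by simpa using hr
            subst hrx
            refine Or.inr ⟨PySem.List.mem_pyRange_one.2 ⟨by omega, by exact_mod_cast hy⟩, ?_⟩
            unfold pvCond
            rw [PySem.List.pyGetD_natCast, PySem.List.pyGetD_natCast]
            simpa [pvMge, pvFl] using hge

-- length of a nodup Int list of the casts of the Nats below n satisfying P
theorem pvLen_eq (s : List Int) (n : Nat) (P : Nat → Bool) (hnd : s.Nodup)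
    (hmem : ∀ z, z ∈ s ↔ ∃ y, y < n ∧ z = (y : Int) ∧ P y = true) :
    s.length = ((List.range n).filter P).length := by
  have hinj : Function.Injective (fun y : Nat => (y : Int)) := fun a b h => by simpa using h
  have h2 : (((List.range n).filter P).map (fun y : Nat => (y : Int))).Nodup :=
    (List.Nodup.filter P List.nodup_range).map hinj
  have hperm : s.Perm (((List.range n).filter P).map (fun y : Nat => (y : Int))) := by
    rw [List.perm_ext_iff_of_nodup hnd h2]
    intro z
    rw [hmem z]
    constructor
    · rintro ⟨y, hy, rfl, hp⟩
      exact List.mem_map.2 ⟨y, List.mem_filter.2 ⟨List.mem_range.2 hy, hp⟩, rfl⟩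
    · intro h
      rcases List.mem_map.1 h with ⟨y, hyf, rfl⟩
      rcases List.mem_filter.1 hyf with ⟨hyr, hp⟩
      exact ⟨y, List.mem_range.1 hyr, rfl, hp⟩
  rw [hperm.length_eq, List.length_map]

theorem pvReps_length (L : List (List (Int × Int))) (se sp : Int) :
    (pvReps L se sp L.length).length
      = ((List.range L.length).filter (fun y => !pvMrg L se sp y)).length := by
  have h2 : ((List.range L.length).filter (fun y => !pvMrg L se sp y)).Nodup :=
    (List.nodup_range).filter _
  have hperm : (pvReps L se sp L.length).Perm
      ((List.range L.length).filter (fun y => !pvMrg L se sp y)) := by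
    rw [List.perm_ext_iff_of_nodup (pvReps_nodup L se sp L.length) h2]
    intro y
    rw [pvMem_reps_iff]
    simp [List.mem_filter, List.mem_range]
  exact hperm.length_eq

-- ===== VERDICT (by name: the statement is the Claim_ definition above) =====
theorem count_distinct_exon_chain_spec : Claim_equal_count_distinct_exon_chain := by
  intro L se sp _
  unfold Spec_count_distinct_exon_chain count_distinct_exon_chain count_distinct_exon_chain_alt
  dsimp only
  by_cases hL : L.length = 0
  · rcases List.length_eq_zero_iff.1 hL with rfl
    simp [PySem.Set.len_eq]
  · have hL1 : 1 ≤ L.length := by omega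
    have hcast : ((L.length : Int) - 1) = ((L.length - 1 : Nat) : Int) := by omega
    rw [hcast]
    obtain ⟨hnd, hmem⟩ := pvOuter L se sp (L.length - 1) (by omega)
    have hmem' : ∀ z, z ∈ ((PySem.List.pyRange 0 ((L.length - 1 : Nat) : Int) 1).foldl (fun merged_idx x =>
        if PySem.Set.contains merged_idx x then merged_idx else
        (PySem.List.pyRange (x + 1) (L.length : Int) 1).foldl (fun merged_idx y =>
          if PySem.Set.contains merged_idx y then merged_idx else
          if (PySem.List.pyGetD L x []).length ≠ (PySem.List.pyGetD L y []).length then merged_idx else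
          let pos_in_x := (PySem.List.pyGetD L x []).flatMap (fun exon => [exon.1, exon.2])
          let pos_in_y := (PySem.List.pyGetD L y []).flatMap (fun exon => [exon.1, exon.2])
          let pos_diff := (pos_in_x.zip pos_in_y).map (fun p => |p.1 - p.2|)
          if (PySem.List.enumerate pos_diff 0).all (fun id =>
                if id.1 = 0 ∨ id.1 = (pos_diff.length : Int) - 1 then id.2 ≤ sp else id.2 ≤ se)
          then PySem.Set.add merged_idx y else merged_idx) merged_idx) PySem.Set.empty) ↔
        ∃ y : Nat, y < L.length ∧ z = (y : Int) ∧ pvMrg L se sp y = true := by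
      intro z
      rw [hmem z]
      constructor
      · rintro ⟨y, hy, rfl, r, hr, hlt, hge⟩
        exact ⟨y, hy, rfl, (pvMrg_iff L se sp (by omega : y ≤ L.length - 1)).2 ⟨r, hr, hlt, hge⟩⟩
      · rintro ⟨y, hy, rfl, hm⟩
        rcases (pvMrg_iff L se sp (by omega : y ≤ L.length - 1)).1 hm with ⟨r, hr, hlt, hge⟩
        exact ⟨y, hy, rfl, r, hr, hlt, hge⟩
    have hA := pvLen_eq _ L.length (pvMrg L se sp) hnd hmem'
    have hB : (L.foldl (fun reps chain =>
        let flat := chain.flatMap (fun exon => [exon.1, exon.2])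
        if reps.any (fun r => pvMatches r flat se sp) then reps
        else reps ++ [flat]) []).length = (pvReps L se sp L.length).length := by
      conv_lhs => rw [← List.take_length (l := L), pvAlt_fold L se sp L.length (le_refl _)]
      rw [List.length_map]
    have hsplit := List.length_eq_length_filter_add (l := List.range L.length) (pvMrg L se sp)
    have hR := pvReps_length L se sp
    rw [PySem.Set.len_eq, hA, hB, hR]
    rw [List.length_range] at hsplit
    omega
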